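-- pv_equiv track=rewrite | github.com/krzysiekbienias/algo-dragons | algo_expert/programming_expert/fundamentals.py | get_n_longest_unique_words
-- ===== SOURCE A (Python) =====
-- def get_n_longest_unique_words(words, n):
--     word_freq = dict()
--     results = []
--     for word in words:
--         if word in word_freq:
--             word_freq[word] += 1
--         else:
--             word_freq[word] = 1
--     for word in word_freq:
--         if word_freq[word] == 1:
--             results.append(word)
--     results = sorted(results, key=lambda x: len(x), reverse=True)
--     return results[:n]
-- ===== SOURCE B (Python) =====
-- def get_n_longest_unique_words(words, n):
--     freq = {}
--     for w in words:
--         freq[w] = freq.get(w, 0) + 1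
--     uniq = [w for w, c in freq.items() if c == 1]
--     buckets = {}
--     for w in uniq:
--         buckets.setdefault(len(w), []).append(w)
--     maxlen = -1
--     for w in uniq:
--         if len(w) > maxlen:
--             maxlen = len(w)
--     out = []
--     for length in range(maxlen, -1, -1):
--         out.extend(buckets.get(length, []))
--     return out[:n]
-- ===== Notes on version B (the rewrite author's own statement) =====
-- stated objective: alternative
-- what changed: Replaces A's comparison sort (sorted with key=len, reverse=True) of the unique words by a bucket table keyed by word length, emitted by one scan over lengths from the maximum down to 0; in-order bucket appends reproduce the stable tie order.
import Mathlib
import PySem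

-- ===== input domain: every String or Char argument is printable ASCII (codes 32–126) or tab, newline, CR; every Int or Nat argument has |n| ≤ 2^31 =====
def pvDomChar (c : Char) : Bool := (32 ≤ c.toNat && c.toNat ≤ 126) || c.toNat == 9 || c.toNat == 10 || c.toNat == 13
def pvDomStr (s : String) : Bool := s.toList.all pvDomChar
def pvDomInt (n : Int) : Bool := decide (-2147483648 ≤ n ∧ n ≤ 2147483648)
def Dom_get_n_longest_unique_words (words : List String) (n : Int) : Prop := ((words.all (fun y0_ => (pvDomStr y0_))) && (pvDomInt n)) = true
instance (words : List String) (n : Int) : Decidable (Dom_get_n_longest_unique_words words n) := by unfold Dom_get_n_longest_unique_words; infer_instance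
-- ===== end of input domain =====

-- B replaces A's comparison sort of the unique words by a bucket table keyed by word
-- length emitted in one descending scan (objective: alternative decomposition, same result).


-- ===== PORT A =====
def get_n_longest_unique_words (words : List String) (n : Int) : List String :=
  -- for word in words: if word in word_freq: word_freq[word] += 1 else: word_freq[word] = 1
  let word_freq : PySem.Dict String Int :=
    words.foldl (fun d word =>
      if d.contains word then d.insert word (d.getD word 0 + 1)   -- key present: getD reads the stored count
      else d.insert word 1) PySem.Dict.empty
  -- for word in word_freq: if word_freq[word] == 1: results.append(word)
  let results : List String :=
    word_freq.keys.foldl (fun acc word =>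
      if word_freq.getD word 0 == 1 then acc ++ [word] else acc) []
  -- results = sorted(results, key=lambda x: len(x), reverse=True)
  let results := PySem.List.sorted results (fun x => PySem.Str.len x) true
  -- return results[:n]
  PySem.List.slice results none (some n)

-- ===== PORT B =====
def get_n_longest_unique_words_alt (words : List String) (n : Int) : List String :=
  -- freq[w] = freq.get(w, 0) + 1
  let freq : PySem.Dict String Int :=
    words.foldl (fun d w => d.insert w (d.getD w 0 + 1)) PySem.Dict.empty
  -- uniq = [w for w, c in freq.items() if c == 1]
  let uniq : List String :=
    freq.items.foldl (fun acc p => if p.2 == (1 : Int) then acc ++ [p.1] else acc) []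
  -- buckets.setdefault(len(w), []).append(w)
  let buckets : PySem.Dict Int (List String) :=
    uniq.foldl (fun d w => d.modify (PySem.Str.len w) [] (fun l => l ++ [w])) PySem.Dict.empty
  -- maxlen = -1; for w in uniq: if len(w) > maxlen: maxlen = len(w)
  let maxlen : Int := uniq.foldl (fun m w => if m < PySem.Str.len w then PySem.Str.len w else m) (-1)
  -- for length in range(maxlen, -1, -1): out.extend(buckets.get(length, []))
  let out : List String :=
    (PySem.List.pyRange maxlen (-1) (-1)).foldl (fun acc L => acc ++ buckets.getD L []) []
  -- return out[:n]
  PySem.List.slice out none (some n)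

-- ===== PRECONDITION & SPEC =====
def Spec_get_n_longest_unique_words (words : List String) (n : Int) (out : List String) : Prop := out = get_n_longest_unique_words_alt words n
instance (words : List String) (n : Int) (out : List String) : Decidable (Spec_get_n_longest_unique_words words n out) := by unfold Spec_get_n_longest_unique_words; infer_instance

-- ===== CLAIM (what is proved, stated in full; the proofs are below) =====
def Claim_equal_get_n_longest_unique_words : Prop := ∀ (words : List String) (n : Int), Dom_get_n_longest_unique_words words n → Spec_get_n_longest_unique_words words n (get_n_longest_unique_words words n)

-- ===== LEMMAS AND PROOFS =====

-- insertBy skips a prefix it is not inserted before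
lemma insertBy_append_of_not_before {α : Type} (before : α → α → Bool) (x : α)
    (p s : List α) (h : ∀ y ∈ p, before x y = false) :
    PySem.List.insertBy before x (p ++ s) = p ++ PySem.List.insertBy before x s := by
  induction p with
  | nil => simp
  | cons y p ih =>
    have hy : before x y = false := h y (by simp)
    simp [PySem.List.insertBy, hy, ih (fun z hz => h z (by simp [hz]))]

-- insertBy prepends when it goes before everything
lemma insertBy_of_all_before {α : Type} (before : α → α → Bool) (x : α)
    (s : List α) (h : ∀ y ∈ s, before x y = true) :
    PySem.List.insertBy before x s = x :: s := by
  cases s with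
  | nil => simp [PySem.List.insertBy]
  | cons y s => simp [PySem.List.insertBy, h y (by simp)]

-- inserting x into the descending bucket concatenation lands at the end of its own bucket
lemma insert_flat {α : Type} (f : α → Int) (Ls : List Int) (u : List α) (x : α)
    (hdesc : Ls.Pairwise (fun a b => b < a)) (hmem : f x ∈ Ls) :
    PySem.List.insertBy (fun a b => decide (f b < f a)) x
      (Ls.flatMap (fun L => u.filter (fun w => f w == L)))
    = Ls.flatMap (fun L => (u ++ [x]).filter (fun w => f w == L)) := by
  induction Ls with
  | nil => simp at hmem
  | cons L Ls ih =>
    have hLt : ∀ L' ∈ Ls, L' < L := (List.pairwise_cons.mp hdesc).1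
    have hdesc' := (List.pairwise_cons.mp hdesc).2
    rw [List.flatMap_cons, List.flatMap_cons]
    by_cases hx : f x = L
    · -- x belongs to the first bucket: pass the bucket, then go before the rest
      have htail : ∀ L' ∈ Ls, ((u ++ [x]).filter (fun w => f w == L'))
          = u.filter (fun w => f w == L') := by
        intro L' hL'
        have hne : f x ≠ L' := by have := hLt L' hL'; omega
        simp [List.filter_append, hne]
      have hbucket : ((u ++ [x]).filter (fun w => f w == L))
          = u.filter (fun w => f w == L) ++ [x] := by
        simp [List.filter_append, hx]
      rw [insertBy_append_of_not_before _ _ _ _ (by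
          intro y hy
          have hyl : f y = L := by simpa using List.of_mem_filter hy
          rw [hyl, hx]; simp),
        insertBy_of_all_before _ _ _ (by
          intro y hy
          rcases List.mem_flatMap.mp hy with ⟨L', hL', hyf⟩
          have hyl : f y = L' := by simpa using List.of_mem_filter hyf
          rw [hyl, hx]
          exact decide_eq_true (hLt L' hL')),
        hbucket, List.flatMap_congr htail]
      simp
    · -- x belongs to a later bucket: skip the first bucket and recurse
      have hmem' : f x ∈ Ls := by
        rcases List.mem_cons.mp hmem with h | h
        · exact absurd h hx
        · exact h
      have hxlt : f x < L := hLt _ hmem'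
      have hbucket : ((u ++ [x]).filter (fun w => f w == L))
          = u.filter (fun w => f w == L) := by
        have hne : f x ≠ L := hx
        simp [List.filter_append, hne]
      rw [insertBy_append_of_not_before _ _ _ _ (by
          intro y hy
          have hyl : f y = L := by simpa using List.of_mem_filter hy
          simp only [hyl, decide_eq_false_iff_not]
          omega),
        ih hdesc' hmem', hbucket]

-- the countdown range is strictly descending
lemma pyRange_neg_one_desc (a b : Int) :
    (PySem.List.pyRange a b (-1)).Pairwise (fun x y => y < x) := by
  rw [PySem.List.pyRange_neg_one, List.pairwise_map]
  exact List.Pairwise.imp (by omega) List.pairwise_lt_range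

-- stable descending sort by length = descending bucket concatenation
lemma sorted_eq_flat (u : List String) (M : Int)
    (h : ∀ w ∈ u, PySem.Str.len w ≤ M) :
    PySem.List.sorted u (fun x => PySem.Str.len x) true
    = (PySem.List.pyRange M (-1) (-1)).flatMap
        (fun L => u.filter (fun w => PySem.Str.len w == L)) := by
  induction u using List.reverseRecOn with
  | nil => simp [PySem.List.sorted]
  | append_singleton u x ih =>
    have hu : ∀ w ∈ u, PySem.Str.len w ≤ M := fun w hw => h w (by simp [hw])
    have hx : PySem.Str.len x ≤ M := h x (by simp)
    rw [PySem.List.sorted_rev_eq_foldl_insertBy, List.foldl_append, List.foldl_cons,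
      List.foldl_nil, ← PySem.List.sorted_rev_eq_foldl_insertBy, ih hu]
    exact insert_flat _ _ u x (pyRange_neg_one_desc M (-1))
      (by rw [PySem.List.mem_pyRange_neg_one]
          have : 0 ≤ PySem.Str.len x := by simp [PySem.Str.len]
          exact ⟨by omega, hx⟩)

-- the running maximum only grows
lemma foldl_max_mono (f : String → Int) (u : List String) (i j : Int) (hij : i ≤ j) :
    i ≤ u.foldl (fun m w => if m < f w then f w else m) j := by
  induction u generalizing i j with
  | nil => simpa
  | cons z u ih =>
    simp only [List.foldl_cons]
    split_ifs with hz
    · exact ih i (f z) (by omega)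
    · exact ih i j hij

-- the running-maximum fold bounds every element
lemma foldl_max_bound (f : String → Int) (u : List String) (init : Int) :
    ∀ w ∈ u, f w ≤ u.foldl (fun m w => if m < f w then f w else m) init := by
  induction u generalizing init with
  | nil => simp
  | cons y u ih =>
    intro w hw
    rcases List.mem_cons.mp hw with rfl | hw
    · simp only [List.foldl_cons]
      split_ifs with hy
      · exact foldl_max_mono f u _ _ le_rfl
      · exact foldl_max_mono f u _ _ (by omega)
    · exact ih _ w hw

-- ===== VERDICT (by name: the statement is the Claim_ definition above) =====
theorem get_n_longest_unique_words_spec : Claim_equal_get_n_longest_unique_words := by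
  intro words n _
  unfold Spec_get_n_longest_unique_words get_n_longest_unique_words get_n_longest_unique_words_alt
  -- the two frequency dicts coincide (both are Counter(words))
  have hstep : (fun (d : PySem.Dict String Int) word =>
      if d.contains word then d.insert word (d.getD word 0 + 1)
      else d.insert word 1)
      = fun d w => d.insert w (d.getD w 0 + 1) := by
    funext d w
    by_cases hc : d.contains w = true
    · simp [hc]
    · have hc' : d.contains w = false := by simpa using hc
      rw [if_neg (by simp [hc']), PySem.Dict.getD_of_not_contains d 0 hc']
      norm_num
  rw [hstep]
  dsimp only
  rw [PySem.List.foldl_append_if_eq_filter, PySem.List.foldl_append_if,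
    PySem.Dict.foldl_insert_getD_add_one_eq_counter, PySem.Dict.keys_counter,
    PySem.Dict.items_counter]
  -- both unique-word lists are the same filter of set(words)
  have huniq : ((((PySem.Set.ofList words).map (fun k => (k, (words.count k : Int)))).filter
        (fun p => p.2 == (1 : Int))).map (fun p => p.1))
      = (PySem.Set.ofList words).filter
        (fun w => (PySem.Dict.counter words).getD w 0 == 1) := by
    rw [List.filter_map, List.map_map]
    have hp : ((fun p : String × Int => p.2 == (1 : Int)) ∘ fun k => (k, (words.count k : Int)))
        = fun w => (PySem.Dict.counter words).getD w 0 == 1 := by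
      funext w; simp [PySem.Dict.getD_counter]
    have hq : ((fun p : String × Int => p.1) ∘ fun k => (k, (words.count k : Int)))
        = fun w => w := by funext w; rfl
    rw [hp, hq, List.map_id']
  rw [List.nil_append, List.nil_append, huniq]
  set u := (PySem.Set.ofList words).filter
      (fun w => (PySem.Dict.counter words).getD w 0 == 1) with hu
  -- B's bucket lookups are filters of u
  have hbucket : ∀ L : Int,
      (u.foldl (fun d w => d.modify (PySem.Str.len w) [] (fun l => l ++ [w]))
        (PySem.Dict.empty : PySem.Dict Int (List String))).getD L []
      = u.filter (fun w => PySem.Str.len w == L) := by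
    intro L
    have hfm : u.foldl (fun d w => d.modify (PySem.Str.len w) [] (fun l => l ++ [w]))
        (PySem.Dict.empty : PySem.Dict Int (List String))
        = (u.map (fun w => (PySem.Str.len w, w))).foldl
            (fun d p => d.modify p.1 [] (fun l => l ++ [p.2])) PySem.Dict.empty := by
      rw [List.foldl_map]
    rw [hfm, PySem.Dict.getD_foldl_modify_append, List.filter_map, List.map_map]
    have hq2 : ((fun x : Int × String => x.2) ∘ fun w => (PySem.Str.len w, w))
        = fun w => w := by funext w; rfl
    have hp2 : ((fun p : Int × String => p.1 == L) ∘ fun w => (PySem.Str.len w, w))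
        = fun w => PySem.Str.len w == L := by funext w; rfl
    rw [hp2, hq2, List.map_id', PySem.Dict.getD_empty, List.nil_append]
  rw [PySem.List.foldl_append_eq_flatMap, List.nil_append,
    List.flatMap_congr (fun L _ => hbucket L),
    sorted_eq_flat u _ (foldl_max_bound PySem.Str.len u (-1))]
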